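-- pv_equiv track=rewrite | github.com/flipstar77/story-illustrator- | story_illustrator/utils/perplexity_researcher.py | _parse_timeline
-- ===== SOURCE A (Python) =====
-- from typing import List, Dict, Optional
--
-- def _parse_timeline(text: str, topic: str) -> List[Dict]:
--     """Parse timeline text into structured events"""
--     events = []
--
--     # Basic parsing - enhance based on actual response format
--     lines = text.strip().split('\n')
--     current_event = {'topic': topic}
--
--     for line in lines:
--         line = line.strip()
--         if not line:
--             if len(current_event) > 1:
--                 events.append(current_event)
--                 current_event = {'topic': topic}
--             continue
--
--         # Extract event data
--         if any(char.isdigit() for char in line[:20]):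
--             if 'date' not in current_event:
--                 current_event['event'] = line
--
--     if len(current_event) > 1:
--         events.append(current_event)
--
--     return events
-- ===== SOURCE B (Python) =====
-- from typing import List, Dict
--
--
-- def _parse_timeline(text: str, topic: str) -> List[Dict]:
--     """Parse timeline text into structured events (group-first decomposition)."""
--     # Pass 1: partition the stripped lines into runs separated by blank lines.
--     groups = []
--     current = []
--     for raw in text.strip().split('\n'):
--         line = raw.strip()
--         if line:
--             current.append(line)
--         elif current:
--             groups.append(current)
--             current = []
--     if current:
--         groups.append(current)
--
--     # Pass 2: each group contributes one event dict iff it contains a line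
--     # whose first 20 characters hold a digit; the last such line wins.
--     events = []
--     for group in groups:
--         winner = None
--         for line in group:
--             if any(c.isdigit() for c in line[:20]):
--                 winner = line
--         if winner is not None:
--             events.append({'topic': topic, 'event': winner})
--     return events
-- ===== Notes on version B (the rewrite author's own statement) =====
-- stated objective: alternative
-- what changed: Replaces A's interleaved accumulator/flush state machine (a dict mutated while scanning lines) with a two-pass group-first decomposition: partition the stripped lines into blank-separated runs, then emit one event per run that contains a digit-bearing line (last such line wins).
import Mathlib
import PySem

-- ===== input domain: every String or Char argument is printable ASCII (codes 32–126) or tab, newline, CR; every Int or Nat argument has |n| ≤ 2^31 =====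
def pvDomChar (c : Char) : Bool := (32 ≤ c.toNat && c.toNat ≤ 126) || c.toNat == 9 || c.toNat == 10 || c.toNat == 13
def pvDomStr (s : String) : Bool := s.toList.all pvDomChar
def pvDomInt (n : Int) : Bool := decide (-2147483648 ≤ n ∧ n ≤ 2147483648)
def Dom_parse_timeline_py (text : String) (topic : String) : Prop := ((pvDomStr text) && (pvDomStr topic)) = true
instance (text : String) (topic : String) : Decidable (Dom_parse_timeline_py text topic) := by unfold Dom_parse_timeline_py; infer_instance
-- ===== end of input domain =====

-- B replaces A's interleaved accumulator/flush state machine by a group-first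
-- decomposition (partition stripped lines into blank-separated runs, then emit one
-- event per run containing a digit-bearing line); objective: alternative decomposition.

-- any(char.isdigit() for char in line[:20])  (identical subexpression in A and B)
def pvHasDigit (line : String) : Bool :=
  (PySem.Str.slice line (some 0) (some 20)).toList.any PySem.Chars.isdigit

-- ===== PORT A =====
-- the body of A's for-loop, as a fold step over (events, current_event)
def pvStepA (topic : String)
    (st : List (List (String × String)) × PySem.Dict String String) (raw : String) :
    List (List (String × String)) × PySem.Dict String String :=
  let line := PySem.Str.strip raw
  if line = "" then
    (if st.2.size > 1 then
      (st.1 ++ [st.2.items], (PySem.Dict.empty).insert "topic" topic)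
    else st)
  else if pvHasDigit line then
    (if st.2.contains "date" = false then (st.1, st.2.insert "event" line) else st)
  else st

def parse_timeline_py (text : String) (topic : String) : List (List (String × String)) :=
  -- text.strip().split('\n'); sep "\n" ≠ "" so split? never returns none
  let lines := (PySem.Str.split? (PySem.Str.strip text) "\n").getD []
  let st := lines.foldl (pvStepA topic) ([], (PySem.Dict.empty).insert "topic" topic)
  if st.2.size > 1 then st.1 ++ [st.2.items] else st.1

-- ===== PORT B =====
-- pass 1 step: partition stripped lines into blank-separated runs
def pvStepG (st : List (List String) × List String) (raw : String) :
    List (List String) × List String :=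
  let line := PySem.Str.strip raw
  if line ≠ "" then (st.1, st.2 ++ [line])
  else if st.2 ≠ [] then (st.1 ++ [st.2], []) else st

-- pass 2 inner loop: the last digit-bearing line of a group, if any
def pvWinner (g : List String) : Option String :=
  g.foldl (fun w line => if pvHasDigit line then some line else w) none

def parse_timeline_py_alt (text : String) (topic : String) : List (List (String × String)) :=
  let lines := (PySem.Str.split? (PySem.Str.strip text) "\n").getD []
  let p := lines.foldl pvStepG ([], [])
  let groups := if p.2 ≠ [] then p.1 ++ [p.2] else p.1
  groups.foldl (fun evs g =>
    match pvWinner g with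
    | some w => evs ++ [[("topic", topic), ("event", w)]]
    | none => evs) []

-- ===== PRECONDITION & SPEC =====
def Spec_parse_timeline_py (text : String) (topic : String) (out : List (List (String × String))) : Prop := out = parse_timeline_py_alt text topic
instance (text : String) (topic : String) (out : List (List (String × String))) : Decidable (Spec_parse_timeline_py text topic out) := by unfold Spec_parse_timeline_py; infer_instance

-- ===== CLAIM (what is proved, stated in full; the proofs are below) =====
def Claim_equal_parse_timeline_py : Prop := ∀ (text : String) (topic : String), Dom_parse_timeline_py text topic → Spec_parse_timeline_py text topic (parse_timeline_py text topic)

-- ===== LEMMAS AND PROOFS =====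

-- A's current_event is always {'topic': topic} plus optionally an 'event' entry
def pvDCur (t : String) : Option String → PySem.Dict String String
  | none => (PySem.Dict.empty).insert "topic" t
  | some e => ((PySem.Dict.empty).insert "topic" t).insert "event" e

def pvEmitOne (t : String) (g : List String) : List (List (String × String)) :=
  match pvWinner g with
  | some w => [[("topic", t), ("event", w)]]
  | none => []

lemma pvDCur_contains_date (t : String) (o : Option String) :
    (pvDCur t o).contains "date" = false := by
  cases o <;> simp [pvDCur, PySem.Dict.contains_insert, PySem.Dict.contains_empty]

lemma pvDCur_size (t : String) (o : Option String) :
    (pvDCur t o).size = match o with | none => 1 | some _ => 2 := by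
  cases o <;> simp [pvDCur, PySem.Dict.size_insert, PySem.Dict.contains_insert,
    PySem.Dict.contains_empty, PySem.Dict.size_empty]

lemma pvDCur_insert_event (t e : String) (o : Option String) :
    (pvDCur t o).insert "event" e = pvDCur t (some e) := by
  cases o with
  | none => rfl
  | some e' =>
    apply PySem.Dict.ext
    simp [pvDCur, PySem.Dict.items_insert, PySem.Dict.contains_insert, PySem.Dict.empty]

lemma pvDCur_items_some (t w : String) :
    (pvDCur t (some w)).items = [("topic", t), ("event", w)] := by
  simp [pvDCur, PySem.Dict.items_insert, PySem.Dict.contains_insert, PySem.Dict.empty]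

lemma pvWinner_append (p : List String) (s : String) :
    pvWinner (p ++ [s]) = if pvHasDigit s then some s else pvWinner p := by
  simp [pvWinner, List.foldl_append]

lemma pvWinner_some_ne_nil {p : List String} {w : String} (h : pvWinner p = some w) :
    p ≠ [] := by
  intro he; subst he; simp [pvWinner] at h

-- B's emission loop over groups, with accumulator pulled out
lemma pvEmit_foldl (t : String) (gs : List (List String))
    (acc : List (List (String × String))) :
    gs.foldl (fun evs g =>
        match pvWinner g with
        | some w => evs ++ [[("topic", t), ("event", w)]]
        | none => evs) acc
      = acc ++ gs.flatMap (pvEmitOne t) := by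
  induction gs generalizing acc with
  | nil => simp
  | cons g gs ih =>
    cases hw : pvWinner g <;> simp [List.flatMap_cons, ih, pvEmitOne, hw]

-- the state-machine invariant: A's fold from (emitted, pvDCur (winner pending))
-- computes what B computes from (groups-so-far, pending)
lemma pvMain (t : String) (ls : List String) :
    ∀ (gs : List (List String)) (p : List String),
    (let st := ls.foldl (pvStepA t) (gs.flatMap (pvEmitOne t), pvDCur t (pvWinner p));
     if st.2.size > 1 then st.1 ++ [st.2.items] else st.1)
    = (let q := ls.foldl pvStepG (gs, p);
       (if q.2 ≠ [] then q.1 ++ [q.2] else q.1).flatMap (pvEmitOne t)) := by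
  induction ls with
  | nil =>
    intro gs p
    cases hw : pvWinner p with
    | none =>
      by_cases hp : p = [] <;>
        simp [pvDCur_size, hp, pvEmitOne, hw]
    | some w =>
      have hne := pvWinner_some_ne_nil hw
      simp [pvDCur_size, hne, pvDCur_items_some, pvEmitOne, hw]
  | cons l ls ih =>
    intro gs p
    simp only [List.foldl_cons]
    by_cases hb : PySem.Str.strip l = ""
    · -- blank line
      cases hw : pvWinner p with
      | some w =>
        have hne := pvWinner_some_ne_nil hw
        have h1 : pvStepA t (gs.flatMap (pvEmitOne t), pvDCur t (some w)) l
            = ((gs ++ [p]).flatMap (pvEmitOne t), pvDCur t none) := by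
          simp [pvStepA, hb, pvDCur_size, pvDCur_items_some, pvEmitOne, hw]
          rfl
        have h2 : pvStepG (gs, p) l = (gs ++ [p], []) := by
          simp [pvStepG, hb, hne]
        rw [h1, h2]
        have := ih (gs ++ [p]) []
        simpa [pvWinner] using this
      | none =>
        have h1 : pvStepA t (gs.flatMap (pvEmitOne t), pvDCur t none) l
            = (gs.flatMap (pvEmitOne t), pvDCur t none) := by
          simp [pvStepA, hb, pvDCur_size]
        rw [h1]
        by_cases hp : p = []
        · have h2 : pvStepG (gs, p) l = (gs, p) := by simp [pvStepG, hb, hp]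
          rw [h2]
          have := ih gs p
          rw [hw] at this; exact this
        · have h2 : pvStepG (gs, p) l = (gs ++ [p], []) := by simp [pvStepG, hb, hp]
          rw [h2]
          have he : (gs ++ [p]).flatMap (pvEmitOne t) = gs.flatMap (pvEmitOne t) := by
            simp [pvEmitOne, hw]
          have := ih (gs ++ [p]) []
          simpa [pvWinner, he] using this
    · -- non-blank line
      have h2 : pvStepG (gs, p) l = (gs, p ++ [PySem.Str.strip l]) := by
        simp [pvStepG, hb]
      rw [h2]
      by_cases hd : pvHasDigit (PySem.Str.strip l)
      · have h1 : pvStepA t (gs.flatMap (pvEmitOne t), pvDCur t (pvWinner p)) l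
            = (gs.flatMap (pvEmitOne t), pvDCur t (pvWinner (p ++ [PySem.Str.strip l]))) := by
          simp [pvStepA, hb, hd, pvDCur_contains_date, pvDCur_insert_event,
            pvWinner_append]
        rw [h1]; exact ih gs (p ++ [PySem.Str.strip l])
      · have h1 : pvStepA t (gs.flatMap (pvEmitOne t), pvDCur t (pvWinner p)) l
            = (gs.flatMap (pvEmitOne t), pvDCur t (pvWinner (p ++ [PySem.Str.strip l]))) := by
          simp [pvStepA, hb, hd, pvWinner_append]
        rw [h1]; exact ih gs (p ++ [PySem.Str.strip l])

-- ===== VERDICT (by name: the statement is the Claim_ definition above) =====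
set_option maxHeartbeats 1000000 in
theorem parse_timeline_py_spec : Claim_equal_parse_timeline_py := by
  intro text topic _
  unfold Spec_parse_timeline_py
  have h := pvMain topic ((PySem.Str.split? (PySem.Str.strip text) "\n").getD []) [] []
  simp only [List.flatMap_nil] at h
  simp only [parse_timeline_py, parse_timeline_py_alt]
  rw [pvEmit_foldl, List.nil_append]
  simpa [pvWinner, pvDCur] using h
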